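-- pv_equiv track=rewrite | github.com/sivasai444/Python-Codes | check perfect no or not.py | factors_of_number
-- ===== SOURCE A (Python) =====
-- def factors_of_number(num, m):
--     factors = []
--     count = 0
--     for i in range(1, num + 1):
--         if num % i == 0:
--             factors.append(i)
--             count += 1
--             if count == m:
--                 break
--     return factors
-- ===== SOURCE B (Python) =====
-- def factors_of_number(num, m):
--     small = []
--     large = []
--     i = 1
--     while i * i <= num:
--         if num % i == 0:
--             small.append(i)
--             if i != num // i:
--                 large.append(num // i)
--         i += 1
--     divs = small + large[::-1]
--     return divs[:m]
-- ===== Notes on version B (the rewrite author's own statement) =====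
-- stated objective: faster
-- what changed: B enumerates divisor pairs i and num//i only up to sqrt(num) (small divisors ascending, cofactors reversed) and slices off the first m, instead of trial-dividing every i from 1 to num with a counter-and-break loop.
-- intended difference: For num >= 1 and m <= 0 A's break counter never fires so A returns ALL divisors of num, while B returns divs[:m] (empty for m = 0, a truncated prefix for m < 0), which is the intended meaning of 'first m divisors'. — e.g. on factors_of_number(6, 0): A returns [1, 2, 3, 6], B returns []
import Mathlib
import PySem

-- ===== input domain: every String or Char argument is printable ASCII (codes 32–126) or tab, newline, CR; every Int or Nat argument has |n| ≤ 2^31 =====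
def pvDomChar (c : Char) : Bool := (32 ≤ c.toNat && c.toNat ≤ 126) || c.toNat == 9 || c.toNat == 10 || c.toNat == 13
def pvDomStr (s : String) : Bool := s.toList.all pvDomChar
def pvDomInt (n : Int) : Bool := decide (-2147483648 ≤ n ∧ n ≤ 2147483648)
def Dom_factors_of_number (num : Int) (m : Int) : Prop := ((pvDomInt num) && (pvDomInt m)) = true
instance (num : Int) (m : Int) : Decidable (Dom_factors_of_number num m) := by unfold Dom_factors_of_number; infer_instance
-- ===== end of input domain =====

-- B replaces A's full trial-division sweep of 1..num by a sqrt-bounded divisor-pair collection plus divs[:m]; equal to A outside D_ (num ≥ 1 with m ≤ 0), where A's counter never fires.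

-- ===== PORT A =====
-- the for-loop of A, with `break` rendered by returning early; state = (factors, count)
def aLoop (num m : Int) : List Int → List Int → Int → List Int
  | [], factors, _ => factors
  | i :: rest, factors, count =>
    if PySem.Int.mod num i == 0 then
      if count + 1 == m then factors ++ [i]
      else aLoop num m rest (factors ++ [i]) (count + 1)
    else aLoop num m rest factors count

def factors_of_number (num : Int) (m : Int) : List Int :=
  aLoop num m (PySem.List.pyRange 1 (num + 1) 1) [] 0

-- ===== PORT B =====
-- the while-loop of B; state = (small, large), i increments until i*i > num
def bLoop (num : Int) (i : Int) (small large : List Int) : List Int × List Int :=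
  if h : i * i ≤ num then
    if PySem.Int.mod num i == 0 then
      if i ≠ PySem.Int.floordiv num i then
        bLoop num (i + 1) (small ++ [i]) (large ++ [PySem.Int.floordiv num i])
      else
        bLoop num (i + 1) (small ++ [i]) large
    else bLoop num (i + 1) small large
  else (small, large)
  termination_by (num + 1 - i).toNat
  decreasing_by
    all_goals
      have hii : i ≤ num := le_trans (by nlinarith [sq_nonneg (i - 1)]) h
      omega

def factors_of_number_alt (num : Int) (m : Int) : List Int :=
  let p := bLoop num 1 [] []
  -- large[::-1] is List.reverse (PySem.List.slice?_none_none_neg_one); divs[:m] is PySem.List.slice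
  let divs := p.1 ++ p.2.reverse
  PySem.List.slice divs none (some m)

-- ===== PRECONDITION & SPEC =====
-- For num ≥ 1 and m ≤ 0 A's break counter never fires so A returns ALL divisors of num,
-- while B returns divs[:m] (empty for m = 0, a truncated prefix for m < 0), the intended 'first m divisors'.
def D_factors_of_number (num : Int) (m : Int) : Prop := 1 ≤ num ∧ m ≤ 0
instance (num : Int) (m : Int) : Decidable (D_factors_of_number num m) := by unfold D_factors_of_number; infer_instance

def Spec_factors_of_number (num : Int) (m : Int) (out : List Int) : Prop := ¬ D_factors_of_number num m → out = factors_of_number_alt num m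
instance (num : Int) (m : Int) (out : List Int) : Decidable (Spec_factors_of_number num m out) := by unfold Spec_factors_of_number; infer_instance

def pvDiffWitness_factors_of_number : Int × Int := (6, 0)
def pvDiffWitnessOut_factors_of_number : (List Int) × (List Int) := ([1, 2, 3, 6], [])

-- ===== CLAIM (what is proved, stated in full; the proofs are below) =====
def Claim_unchanged_factors_of_number : Prop := ∀ (num : Int) (m : Int), Dom_factors_of_number num m → Spec_factors_of_number num m (factors_of_number num m)
def Claim_changed_factors_of_number : Prop := Dom_factors_of_number (pvDiffWitness_factors_of_number.1) (pvDiffWitness_factors_of_number.2) ∧ D_factors_of_number (pvDiffWitness_factors_of_number.1) (pvDiffWitness_factors_of_number.2) ∧ factors_of_number (pvDiffWitness_factors_of_number.1) (pvDiffWitness_factors_of_number.2) = pvDiffWitnessOut_factors_of_number.1 ∧ factors_of_number_alt (pvDiffWitness_factors_of_number.1) (pvDiffWitness_factors_of_number.2) = pvDiffWitnessOut_factors_of_number.2 ∧ pvDiffWitnessOut_factors_of_number.1 ≠ pvDiffWitnessOut_factors_of_number.2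
def Claim_exact_factors_of_number : Prop := ∀ (num : Int) (m : Int), Dom_factors_of_number num m → D_factors_of_number num m → factors_of_number num m ≠ factors_of_number_alt num m

-- ===== LEMMAS AND PROOFS =====

-- the ascending list of all divisors of num in [1, num]
def allDivs (num : Int) : List Int :=
  (PySem.List.pyRange 1 (num + 1) 1).filter (fun i => PySem.Int.mod num i == 0)

-- what B's loop has accumulated before visiting i
def smallOf (num i : Int) : List Int :=
  (PySem.List.pyRange 1 i 1).filter (fun j => PySem.Int.mod num j == 0)
def largeOf (num i : Int) : List Int :=
  ((PySem.List.pyRange 1 i 1).filter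
      (fun j => PySem.Int.mod num j == 0 && !(j == PySem.Int.floordiv num j))).map
    (fun j => PySem.Int.floordiv num j)

lemma fd_mul (num j : Int) (hj : 0 < j) (hd : j ∣ num) :
    PySem.Int.floordiv num j * j = num := by
  rw [PySem.Int.floordiv_eq_ediv_of_pos hj]
  exact Int.ediv_mul_cancel hd

lemma aLoop_eq (num m : Int) (L : List Int) (facs : List Int) (count : Int) :
    aLoop num m L facs count =
      facs ++ (if count < m
        then (L.filter (fun i => PySem.Int.mod num i == 0)).take (m - count).toNat
        else L.filter (fun i => PySem.Int.mod num i == 0)) := by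
  induction L generalizing facs count with
  | nil => simp [aLoop]
  | cons i rest ih =>
    simp only [aLoop, List.filter_cons]
    by_cases hd : (PySem.Int.mod num i == 0) = true
    · rw [if_pos hd, if_pos hd]
      by_cases hb : count + 1 = m
      · have hlt : count < m := by omega
        rw [if_pos (by simpa using hb), if_pos hlt]
        have h1 : (m - count).toNat = 1 := by omega
        simp [h1]
      · rw [if_neg (by simpa using hb), ih]
        by_cases hlt : count < m
        · have hlt' : count + 1 < m := by omega
          rw [if_pos hlt', if_pos hlt]
          have h2 : (m - count).toNat = (m - (count + 1)).toNat + 1 := by omega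
          simp [h2]
        · rw [if_neg (by omega : ¬ count + 1 < m), if_neg hlt]
          simp
    · rw [if_neg hd, if_neg hd]
      exact ih facs count

lemma pairing (num i : Int) (hi : 1 ≤ i) (hgt : num < i * i)
    (hprev : ∀ j, 1 ≤ j → j < i → j * j ≤ num) :
    smallOf num i ++ (largeOf num i).reverse = allDivs num := by
  -- membership characterizations
  have mem_small : ∀ x, x ∈ smallOf num i ↔ 1 ≤ x ∧ x < i ∧ x ∣ num := by
    intro x
    simp [smallOf, List.mem_filter, PySem.List.mem_pyRange_one, PySem.Int.mod_eq_zero_iff_dvd,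
      and_assoc]
  have mem_lsrc : ∀ j, j ∈ (PySem.List.pyRange 1 i 1).filter
      (fun j => PySem.Int.mod num j == 0 && !(j == PySem.Int.floordiv num j)) ↔
      1 ≤ j ∧ j < i ∧ j ∣ num ∧ j ≠ PySem.Int.floordiv num j := by
    intro j
    simp [List.mem_filter, PySem.List.mem_pyRange_one, Bool.and_eq_true,
      PySem.Int.mod_eq_zero_iff_dvd, beq_eq_false_iff_ne, and_assoc]
  have mem_large : ∀ x, x ∈ largeOf num i ↔
      ∃ j, (1 ≤ j ∧ j < i ∧ j ∣ num ∧ j ≠ PySem.Int.floordiv num j) ∧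
        PySem.Int.floordiv num j = x := by
    intro x
    simp only [largeOf, List.mem_map]
    constructor
    · rintro ⟨j, hj, rfl⟩; exact ⟨j, (mem_lsrc j).mp hj, rfl⟩
    · rintro ⟨j, hj, rfl⟩; exact ⟨j, (mem_lsrc j).mpr hj, rfl⟩
  have mem_all : ∀ x, x ∈ allDivs num ↔ 1 ≤ x ∧ x ≤ num ∧ x ∣ num := by
    intro x
    simp [allDivs, List.mem_filter, PySem.List.mem_pyRange_one, PySem.Int.mod_eq_zero_iff_dvd,
      and_assoc]
  -- arithmetic facts about cofactors
  have hq : ∀ j, 1 ≤ j → j < i → j ∣ num → j ≠ PySem.Int.floordiv num j →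
      (PySem.Int.floordiv num j * j = num ∧ 1 ≤ PySem.Int.floordiv num j ∧
        num < PySem.Int.floordiv num j * PySem.Int.floordiv num j) := by
    intro j h1 h2 hd hne
    have hjj : j * j ≤ num := hprev j h1 h2
    have hmul : PySem.Int.floordiv num j * j = num := fd_mul num j (by omega) hd
    have hpos : 1 ≤ PySem.Int.floordiv num j := by nlinarith
    have hgtj : j < PySem.Int.floordiv num j := by
      have hle : j ≤ PySem.Int.floordiv num j := by nlinarith
      rcases eq_or_lt_of_le hle with h | h
      · exact absurd h hne
      · exact h
    refine ⟨hmul, hpos, by nlinarith⟩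
  have small_sq : ∀ x, x ∈ smallOf num i → 1 ≤ x ∧ x * x ≤ num := by
    intro x hx
    obtain ⟨h1, h2, _⟩ := (mem_small x).mp hx
    exact ⟨h1, hprev x h1 h2⟩
  have large_sq : ∀ x, x ∈ largeOf num i → 1 ≤ x ∧ num < x * x := by
    intro x hx
    obtain ⟨j, ⟨h1, h2, hd, hne⟩, rfl⟩ := (mem_large x).mp hx
    obtain ⟨_, hp, hgt2⟩ := hq j h1 h2 hd hne
    exact ⟨hp, hgt2⟩
  -- nodup
  have nod_small : (smallOf num i).Nodup := (PySem.List.nodup_pyRange_one 1 i).filter _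
  have nod_lsrc : ((PySem.List.pyRange 1 i 1).filter
      (fun j => PySem.Int.mod num j == 0 && !(j == PySem.Int.floordiv num j))).Nodup :=
    (PySem.List.nodup_pyRange_one 1 i).filter _
  have nod_large : (largeOf num i).Nodup := by
    refine List.Nodup.map_on ?_ nod_lsrc
    intro x hx y hy hxy
    obtain ⟨hx1, hx2, hxd, _⟩ := (mem_lsrc x).mp hx
    obtain ⟨hy1, hy2, hyd, _⟩ := (mem_lsrc y).mp hy
    have hmx := fd_mul num x (by omega) hxd
    have hmy := fd_mul num y (by omega) hyd
    have hqpos : 0 < PySem.Int.floordiv num y := by nlinarith [hprev y hy1 hy2]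
    rw [hxy] at hmx
    have heq : PySem.Int.floordiv num y * x = PySem.Int.floordiv num y * y := hmx.trans hmy.symm
    exact mul_left_cancel₀ (by omega) heq
  have nod_lhs : (smallOf num i ++ (largeOf num i).reverse).Nodup := by
    rw [List.nodup_append]
    refine ⟨nod_small, List.nodup_reverse.mpr nod_large, fun a ha b hb heq => ?_⟩
    subst heq
    have h1 := small_sq a ha
    have h2 := large_sq a (List.mem_reverse.mp hb)
    nlinarith [h1.2, h2.2]
  have nod_rhs : (allDivs num).Nodup := (PySem.List.nodup_pyRange_one 1 (num + 1)).filter _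
  -- sortedness (strict, then weakened)
  have sort_small : (smallOf num i).Pairwise (· < ·) :=
    (PySem.List.pairwise_lt_pyRange_one 1 i).filter _
  have sort_lsrc : ((PySem.List.pyRange 1 i 1).filter
      (fun j => PySem.Int.mod num j == 0 && !(j == PySem.Int.floordiv num j))).Pairwise (· < ·) :=
    (PySem.List.pairwise_lt_pyRange_one 1 i).filter _
  have sort_large_rev : ((largeOf num i).reverse).Pairwise (· < ·) := by
    rw [List.pairwise_reverse]
    unfold largeOf
    rw [List.pairwise_map]
    refine sort_lsrc.imp_of_mem ?_
    intro a b ha hb hab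
    obtain ⟨ha1, ha2, had, hane⟩ := (mem_lsrc a).mp ha
    obtain ⟨hb1, hb2, hbd, hbne⟩ := (mem_lsrc b).mp hb
    obtain ⟨hma, hpa, _⟩ := hq a ha1 ha2 had hane
    obtain ⟨hmb, hpb, _⟩ := hq b hb1 hb2 hbd hbne
    nlinarith
  have sort_lhs : (smallOf num i ++ (largeOf num i).reverse).Pairwise (· < ·) := by
    rw [List.pairwise_append]
    refine ⟨sort_small, sort_large_rev, ?_⟩
    intro x hx y hy
    have h1 := small_sq x hx
    have h2 := large_sq y (List.mem_reverse.mp hy)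
    nlinarith
  have sort_rhs : (allDivs num).Pairwise (· < ·) :=
    (PySem.List.pairwise_lt_pyRange_one 1 (num + 1)).filter _
  -- same members
  have hmem : ∀ x, x ∈ smallOf num i ++ (largeOf num i).reverse ↔ x ∈ allDivs num := by
    intro x
    rw [List.mem_append, List.mem_reverse, mem_all]
    constructor
    · rintro (hx | hx)
      · obtain ⟨h1, h2, hd⟩ := (mem_small x).mp hx
        have := hprev x h1 h2
        exact ⟨h1, by nlinarith, hd⟩
      · obtain ⟨j, ⟨h1, h2, hd, hne⟩, rfl⟩ := (mem_large x).mp hx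
        obtain ⟨hm, hp, _⟩ := hq j h1 h2 hd hne
        have hnum : 1 ≤ num := by nlinarith [hprev j h1 h2]
        have hdvd : PySem.Int.floordiv num j ∣ num := ⟨j, hm.symm⟩
        exact ⟨hp, Int.le_of_dvd (by omega) hdvd, hdvd⟩
    · rintro ⟨h1, h2, hd⟩
      by_cases hlt : x < i
      · exact Or.inl ((mem_small x).mpr ⟨h1, hlt, hd⟩)
      · right
        rw [mem_large]
        have hxx : num < x * x := by nlinarith [(by omega : i ≤ x)]
        set j := PySem.Int.floordiv num x with hj
        have hmx : j * x = num := fd_mul num x (by omega) hd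
        have hnum : 1 ≤ num := le_trans h1 h2
        have hjpos : 1 ≤ j := by nlinarith
        have hjlt : j < x := by nlinarith
        have hjj : j * j < num := by nlinarith
        have hji : j < i := by
          by_contra hcon
          have : i ≤ j := by omega
          nlinarith
        have hjd : j ∣ num := ⟨x, hmx.symm⟩
        have hqj : PySem.Int.floordiv num j = x := by
          have hmj : PySem.Int.floordiv num j * j = num := fd_mul num j (by omega) hjd
          have : PySem.Int.floordiv num j * j = x * j := by rw [hmj]; linarith [hmx]
          exact mul_right_cancel₀ (by omega) this
        exact ⟨j, ⟨hjpos, hji, hjd, by rw [hqj]; omega⟩, hqj⟩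
  -- conclude
  have hperm : (smallOf num i ++ (largeOf num i).reverse).Perm (allDivs num) :=
    (List.perm_ext_iff_of_nodup nod_lhs nod_rhs).mpr hmem
  exact List.Perm.eq_of_pairwise (fun a b _ _ h1 h2 => absurd h2 (lt_asymm h1))
    sort_lhs sort_rhs hperm

lemma bLoop_inv (num : Int) : ∀ k (i : Int), (num + 1 - i).toNat ≤ k → 1 ≤ i →
    (∀ j, 1 ≤ j → j < i → j * j ≤ num) →
    (bLoop num i (smallOf num i) (largeOf num i)).1 ++
      (bLoop num i (smallOf num i) (largeOf num i)).2.reverse = allDivs num := by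
  intro k
  induction k with
  | zero =>
    intro i hk hi hprev
    have hgt : num < i * i := by nlinarith [(by omega : num + 1 ≤ i)]
    rw [bLoop, dif_neg (not_le.mpr hgt)]
    exact pairing num i hi hgt hprev
  | succ k ih =>
    intro i hk hi hprev
    by_cases h : i * i ≤ num
    · have hii : i ≤ num := le_trans (by nlinarith) h
      have hrange : PySem.List.pyRange 1 (i + 1) 1 = PySem.List.pyRange 1 i 1 ++ [i] :=
        PySem.List.pyRange_one_succ_right hi
      have hk' : (num + 1 - (i + 1)).toNat ≤ k := by omega
      have hprev' : ∀ j, 1 ≤ j → j < i + 1 → j * j ≤ num := by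
        intro j h1 h2
        rcases lt_or_eq_of_le (by omega : j ≤ i) with h3 | h3
        · exact hprev j h1 h3
        · subst h3; exact h
      rw [bLoop, dif_pos h]
      by_cases hd : (PySem.Int.mod num i == 0) = true
      · rw [if_pos hd]
        by_cases hne : i ≠ PySem.Int.floordiv num i
        · rw [if_pos hne]
          have hs : smallOf num i ++ [i] = smallOf num (i + 1) := by
            simp [smallOf, hrange, List.filter_append, hd]
          have hl : largeOf num i ++ [PySem.Int.floordiv num i] = largeOf num (i + 1) := by
            simp [largeOf, hrange, List.filter_append, hd, hne]
          rw [hs, hl]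
          exact ih (i + 1) hk' (by omega) hprev'
        · rw [if_neg hne]
          have hb : (i == PySem.Int.floordiv num i) = true := beq_iff_eq.mpr (not_ne_iff.mp hne)
          have hs : smallOf num i ++ [i] = smallOf num (i + 1) := by
            simp [smallOf, hrange, List.filter_append, hd]
          have hl : largeOf num i = largeOf num (i + 1) := by
            simp [largeOf, hrange, List.filter_append, hd, hb]
          rw [hs, hl]
          exact ih (i + 1) hk' (by omega) hprev'
      · rw [if_neg hd]
        have hs : smallOf num i = smallOf num (i + 1) := by
          simp [smallOf, hrange, List.filter_append, hd]
        have hl : largeOf num i = largeOf num (i + 1) := by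
          simp [largeOf, hrange, List.filter_append, hd]
        rw [hs, hl]
        exact ih (i + 1) hk' (by omega) hprev'
    · have hgt : num < i * i := not_le.mp h
      rw [bLoop, dif_neg h]
      exact pairing num i hi hgt hprev

lemma bLoop_combined (num : Int) :
    (bLoop num 1 [] []).1 ++ (bLoop num 1 [] []).2.reverse = allDivs num := by
  have h := bLoop_inv num (num + 1 - 1).toNat 1 (by omega) (by omega) (by omega)
  simpa [smallOf, largeOf, PySem.List.pyRange_one_eq_nil (by omega : (1:Int) ≤ 1)] using h

lemma one_mem_allDivs (num : Int) (h : 1 ≤ num) : (1 : Int) ∈ allDivs num := by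
  simp [allDivs, List.mem_filter, PySem.List.mem_pyRange_one]
  omega

-- ===== VERDICT (by name: the statement is the Claim_ definition above) =====
theorem factors_of_number_spec : Claim_unchanged_factors_of_number := by
  intro num m _
  unfold Spec_factors_of_number
  intro hD
  unfold factors_of_number factors_of_number_alt
  rw [aLoop_eq]
  show ([] ++ (if (0:Int) < m then (allDivs num).take (m - 0).toNat else allDivs num)) =
    PySem.List.slice ((bLoop num 1 [] []).1 ++ (bLoop num 1 [] []).2.reverse) none (some m)
  rw [bLoop_combined]
  simp only [List.nil_append]
  by_cases hm : 0 < m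
  · rw [if_pos hm, PySem.List.slice_to _ (by omega)]
    norm_num
  · have hnum : num ≤ 0 := by
      unfold D_factors_of_number at hD; omega
    have hnil : allDivs num = [] := by
      simp [allDivs, PySem.List.pyRange_one_eq_nil (by omega : num + 1 ≤ 1)]
    rw [if_neg hm, hnil]
    simp [PySem.List.slice]

theorem factors_of_number_changed : Claim_changed_factors_of_number := by
  unfold Claim_changed_factors_of_number; decide

theorem factors_of_number_tight : Claim_exact_factors_of_number := by
  intro num m _ hD
  obtain ⟨h1, hm⟩ := hD
  unfold factors_of_number factors_of_number_alt
  rw [aLoop_eq]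
  show ([] ++ (if (0:Int) < m then (allDivs num).take (m - 0).toNat else allDivs num)) ≠
    PySem.List.slice ((bLoop num 1 [] []).1 ++ (bLoop num 1 [] []).2.reverse) none (some m)
  rw [bLoop_combined]
  rw [if_neg (by omega : ¬ (0:Int) < m)]
  simp only [List.nil_append]
  have hlen : 1 ≤ (allDivs num).length :=
    List.length_pos_of_mem (one_mem_allDivs num h1)
  rcases eq_or_lt_of_le hm with hm0 | hmneg
  · subst hm0
    rw [PySem.List.slice_to _ le_rfl]
    intro hcon
    rw [show ((0:Int)).toNat = 0 from rfl, List.take_zero] at hcon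
    rw [hcon] at hlen
    simp at hlen
  · have hk : m = -(((-m).toNat : Nat) : Int) := by omega
    rw [hk, PySem.List.slice_to_neg_natCast _ _ (by omega)]
    intro hcon
    have := congrArg List.length hcon
    rw [List.length_take] at this
    omega
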